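-- pv_equiv track=rewrite | github.com/fares-fraoucene/runtrack-python | jour04/job14/index.py | my_long_word
-- ===== SOURCE A (Python) =====
-- def my_long_word(length_threshold, input_string):
--     resultat = ""
--     mot = ""
--     space = True
--     for char in input_string:
--         if char == ' ':
--             if not space:
--                 if len(mot) > length_threshold:
--                     resultat += mot + ' '
--                 mot = ""
--             space = True
--         else:
--             mot += char
--             space = False
--     if len(mot) > length_threshold:
--         resultat += mot
--     return resultat.strip()
-- ===== SOURCE B (Python) =====
-- def my_long_word(length_threshold, input_string):
--     words = input_string.split(' ')
--     kept = [w for w in words if w and len(w) > length_threshold]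
--     return ' '.join(kept).strip()
-- ===== Notes on version B (the rewrite author's own statement) =====
-- stated objective: idiomatic
-- what changed: Replaces the character-by-character accumulator loop with its space/word state flags by split(' '), a filter comprehension keeping nonempty words longer than the threshold, and a single ' '.join plus strip.
import Mathlib
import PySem

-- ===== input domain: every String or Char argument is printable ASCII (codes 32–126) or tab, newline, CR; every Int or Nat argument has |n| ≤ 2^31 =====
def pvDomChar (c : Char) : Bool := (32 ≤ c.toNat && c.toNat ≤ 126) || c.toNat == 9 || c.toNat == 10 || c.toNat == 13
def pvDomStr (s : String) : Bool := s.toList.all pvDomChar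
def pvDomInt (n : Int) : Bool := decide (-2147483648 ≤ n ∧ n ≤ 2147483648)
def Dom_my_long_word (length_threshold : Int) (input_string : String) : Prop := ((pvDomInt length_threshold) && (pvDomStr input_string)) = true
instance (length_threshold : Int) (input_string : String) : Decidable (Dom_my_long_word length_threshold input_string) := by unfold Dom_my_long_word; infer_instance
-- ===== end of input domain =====

-- B rewrites A's character-level accumulator loop as split(' ') + filter + ' '.join + strip (idiomatic, same behaviour).

-- ===== PORT A =====
-- A's for-loop over the characters, as structural recursion over the same state (resultat, mot, space);
-- the trailing `if len(mot) > length_threshold` is the [] case; then resultat.strip().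
def pvLoopA (t : Int) (res mot : List Char) (space : Bool) : List Char → List Char
  | [] => if (mot.length : Int) > t then res ++ mot else res
  | c :: cs =>
    if c = ' ' then
      if !space then
        pvLoopA t (if (mot.length : Int) > t then res ++ mot ++ [' '] else res) [] true cs
      else
        pvLoopA t res mot true cs
    else
      pvLoopA t res (mot ++ [c]) false cs

def my_long_word (length_threshold : Int) (input_string : String) : String :=
  String.ofList (PySem.Chars.strip (pvLoopA length_threshold [] [] true input_string.toList))

-- ===== PORT B =====
def my_long_word_alt (length_threshold : Int) (input_string : String) : String :=
  let words := PySem.Chars.splitOn input_string.toList [' ']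
  let kept := words.filter (fun w => !w.isEmpty && decide (length_threshold < (w.length : Int)))
  String.ofList (PySem.Chars.strip (PySem.Chars.join [' '] kept))

-- ===== PRECONDITION & SPEC =====
def Spec_my_long_word (length_threshold : Int) (input_string : String) (out : String) : Prop := out = my_long_word_alt length_threshold input_string
instance (length_threshold : Int) (input_string : String) (out : String) : Decidable (Spec_my_long_word length_threshold input_string out) := by unfold Spec_my_long_word; infer_instance

-- ===== CLAIM (what is proved, stated in full; the proofs are below) =====
def Claim_equal_my_long_word : Prop := ∀ (length_threshold : Int) (input_string : String), Dom_my_long_word length_threshold input_string → Spec_my_long_word length_threshold input_string (my_long_word length_threshold input_string)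

-- ===== LEMMAS AND PROOFS =====

-- the filter predicate of B
def pvKeep (t : Int) (w : List Char) : Bool := !w.isEmpty && decide (t < (w.length : Int))

-- split on a single literal space, structurally (proved equal to PySem.Chars.splitOn · [' '])
def pvSplit : List Char → List Char → List (List Char)
  | pre, [] => [pre]
  | pre, c :: cs => if c = ' ' then pre :: pvSplit [] cs else pvSplit (pre ++ [c]) cs

lemma pvSplit_ne_nil (pre cs) : pvSplit pre cs ≠ [] := by
  induction cs generalizing pre with
  | nil => simp [pvSplit]
  | cons c cs ih =>
    simp only [pvSplit]
    split_ifs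
    · simp
    · simp [ih]

lemma splitOn_go_eq (cs : List Char) : ∀ (fuel : Nat) (cur : List Char) (acc : List (List Char)),
    cs.length < fuel →
    PySem.Chars.splitOn.go [' '] fuel cs cur acc = acc.reverse ++ pvSplit cur.reverse cs := by
  induction cs with
  | nil =>
    intro fuel cur acc h
    obtain ⟨f, rfl⟩ : ∃ f, fuel = f + 1 := ⟨fuel - 1, by omega⟩
    simp [PySem.Chars.splitOn.go, pvSplit]
  | cons c cs ih =>
    intro fuel cur acc h
    obtain ⟨f, rfl⟩ : ∃ f, fuel = f + 1 := ⟨fuel - 1, by omega⟩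
    by_cases hc : c = ' '
    · subst hc
      simp only [PySem.Chars.splitOn.go, List.isPrefixOf, pvSplit]
      simp only [List.length_cons] at h
      rw [if_pos (by simp), show List.drop [' '].length (' ' :: cs) = cs from rfl,
        ih f [] (cur.reverse :: acc) (by omega)]
      simp
    · simp only [PySem.Chars.splitOn.go, List.isPrefixOf, pvSplit]
      rw [if_neg (by simpa using Ne.symm hc),
        ih f (c :: cur) acc (by simp only [List.length_cons] at h; omega)]
      simp [hc]

lemma splitOn_eq (cs : List Char) : PySem.Chars.splitOn cs [' '] = pvSplit [] cs := by
  have := splitOn_go_eq cs (cs.length + 1) [] [] (by omega)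
  simpa [PySem.Chars.splitOn] using this

-- what A's resultat (before strip) looks like on a token list
def pvEmit (t : Int) : List (List Char) → List Char
  | [] => []
  | w :: ws =>
    match ws with
    | [] => if pvKeep t w then w else []
    | _ :: _ => (if pvKeep t w then w ++ [' '] else []) ++ pvEmit t ws

lemma loopA_eq (t : Int) : ∀ (cs res mot : List Char) (space : Bool),
    space = mot.isEmpty →
    pvLoopA t res mot space cs = res ++ pvEmit t (pvSplit mot cs) := by
  intro cs
  induction cs with
  | nil =>
    intro res mot space hs
    cases mot with
    | nil => simp [pvLoopA, pvSplit, pvEmit, pvKeep]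
    | cons m ms =>
      simp only [pvLoopA, pvSplit, pvEmit, pvKeep]
      split_ifs with h1 h2 <;> simp_all <;> omega
  | cons c cs ih =>
    intro res mot space hs
    by_cases hc : c = ' '
    · subst hc
      have hne := pvSplit_ne_nil ([] : List Char) cs
      cases mot with
      | nil =>
        simp only [List.isEmpty_nil] at hs; subst hs
        simp only [pvLoopA, Bool.not_true, Bool.false_eq_true, if_false, pvSplit]
        rw [ih res [] true rfl]
        cases h : pvSplit ([] : List Char) cs with
        | nil => exact absurd h hne
        | cons a l => simp [pvEmit, pvKeep]
      | cons m ms =>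
        simp only [List.isEmpty_cons] at hs; subst hs
        simp only [pvLoopA, Bool.not_false, if_true, pvSplit]
        rw [ih _ [] true rfl]
        cases h : pvSplit ([] : List Char) cs with
        | nil => exact absurd h hne
        | cons a l =>
          simp only [pvEmit, pvKeep, List.isEmpty_cons, Bool.not_false, Bool.true_and]
          split_ifs with h1 h2 <;> simp_all <;> omega
    · simp only [pvLoopA, if_neg hc, pvSplit]
      rw [ih res (mot ++ [c]) false (by simp)]

lemma pvEmit_cons_cons (t : Int) (w v : List Char) (vs : List (List Char)) :
    pvEmit t (w :: v :: vs) = (if pvKeep t w then w ++ [' '] else []) ++ pvEmit t (v :: vs) := rfl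

lemma pvEmit_join (t : Int) : ∀ (ts : List (List Char)), ts ≠ [] →
    pvEmit t ts = PySem.Chars.join [' '] (ts.filter (pvKeep t)) ∨
    (ts.filter (pvKeep t) ≠ [] ∧
      pvEmit t ts = PySem.Chars.join [' '] (ts.filter (pvKeep t)) ++ [' ']) := by
  intro ts
  induction ts with
  | nil => intro h; exact absurd rfl h
  | cons w ws ih =>
    intro _
    cases ws with
    | nil =>
      by_cases hk : pvKeep t w
      · left; simp [pvEmit, hk, PySem.Chars.join, List.intercalate]
      · left; simp [pvEmit, hk, PySem.Chars.join, List.intercalate]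
    | cons v vs =>
      by_cases hk : pvKeep t w
      · rcases ih (by simp) with h | ⟨hne, h⟩
        · cases hf : (v :: vs).filter (pvKeep t) with
          | nil =>
            right
            refine ⟨by simp [List.filter_cons, hk], ?_⟩
            rw [pvEmit_cons_cons, if_pos hk, h, hf]
            simp [hk, hf, PySem.Chars.join, List.intercalate]
          | cons a l =>
            left
            rw [pvEmit_cons_cons, if_pos hk, h]
            simp [hk, hf, PySem.Chars.join, List.intercalate]
        · cases hf : (v :: vs).filter (pvKeep t) with
          | nil => exact absurd hf hne
          | cons a l =>
            right
            refine ⟨by simp [List.filter_cons, hk], ?_⟩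
            rw [pvEmit_cons_cons, if_pos hk, h, hf]
            simp [hk, hf, PySem.Chars.join, List.intercalate]
      · rcases ih (by simp) with h | ⟨hne, h⟩
        · left
          rw [pvEmit_cons_cons, if_neg hk, h]
          simp [List.filter_cons, hk]
        · right
          refine ⟨by simpa [List.filter_cons, hk] using hne, ?_⟩
          rw [pvEmit_cons_cons, if_neg hk, h]
          simp [List.filter_cons, hk]

lemma rstrip_append_space (x : List Char) : PySem.Chars.rstrip (x ++ [' ']) = PySem.Chars.rstrip x := by
  simp [PySem.Chars.rstrip, PySem.Chars.isspace]

lemma strip_append_space (x : List Char) : PySem.Chars.strip (x ++ [' ']) = PySem.Chars.strip x := by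
  simp only [PySem.Chars.strip, PySem.Chars.lstrip, List.dropWhile_append]
  by_cases h : (x.dropWhile PySem.Chars.isspace).isEmpty
  · simp [List.dropWhile, PySem.Chars.isspace, PySem.Chars.rstrip,
      List.isEmpty_iff.mp h]
  · simp [h, rstrip_append_space]

-- ===== VERDICT (by name: the statement is the Claim_ definition above) =====
theorem my_long_word_spec : Claim_equal_my_long_word := by
  intro t s _
  unfold Spec_my_long_word my_long_word my_long_word_alt
  rw [loopA_eq t s.toList [] [] true rfl, splitOn_eq]
  simp only [List.nil_append]
  rcases pvEmit_join t (pvSplit [] s.toList) (pvSplit_ne_nil _ _) with h | ⟨_, h⟩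
  · rw [h]; rfl
  · rw [h, strip_append_space]; rfl
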